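-- pv_equiv track=rewrite | github.com/heavysaturn/aoc-2018 | day7/helpers.py | get_last_step
-- ===== SOURCE A (Python) =====
-- def get_last_step(steps):
--     """
--     Get the last step from a dict
--     of {step: [next_steps]}
--     """
--
--     regular_steps = []
--     final_step = []
--     for step, next_steps in steps.items():
--
--         regular_steps.append(step)
--         final_step.extend(next_steps)
--
--         if step in final_step:
--             final_step.remove(step)
--
--     return final_step[0]
-- ===== SOURCE B (Python) =====
-- def get_last_step(steps):
--     """
--     Get the last step from a dict
--     of {step: [next_steps]}
--     """
--
--     stream = []          # all successors in encounter order
--     first_pos = {}       # value -> index of its first occurrence in stream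
--     removed = set()      # indices deleted by processed keys
--     for step, next_steps in steps.items():
--         for s in next_steps:
--             if s not in first_pos:
--                 first_pos[s] = len(stream)
--             stream.append(s)
--         j = first_pos.get(step)
--         if j is not None:
--             removed.add(j)
--     return [s for i, s in enumerate(stream) if i not in removed][0]
-- ===== Notes on version B (the rewrite author's own statement) =====
-- stated objective: faster
-- what changed: Instead of repeatedly scanning and mutating the growing final_step list (membership test + list.remove per key), B makes one pass recording each successor's first-occurrence position in a dict and the positions deleted by processed keys in a set, then returns the first surviving position's value.
-- outside the precondition, e.g. on get_last_step({'a': []}): A raises IndexError, B raises IndexError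
import Mathlib
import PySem

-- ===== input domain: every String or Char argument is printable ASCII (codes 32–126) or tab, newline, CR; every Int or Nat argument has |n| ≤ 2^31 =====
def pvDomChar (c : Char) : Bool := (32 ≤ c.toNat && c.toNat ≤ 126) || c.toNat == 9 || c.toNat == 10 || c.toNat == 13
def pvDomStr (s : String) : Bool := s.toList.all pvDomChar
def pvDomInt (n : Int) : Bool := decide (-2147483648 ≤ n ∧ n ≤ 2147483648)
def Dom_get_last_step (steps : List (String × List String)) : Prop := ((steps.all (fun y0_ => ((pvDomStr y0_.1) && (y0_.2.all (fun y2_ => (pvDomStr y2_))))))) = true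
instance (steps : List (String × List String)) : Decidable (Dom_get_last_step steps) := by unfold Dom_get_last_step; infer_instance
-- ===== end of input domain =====

-- B replaces A's quadratic list surgery (membership test + list.remove on the growing successor
-- list) by a single pass that records first-occurrence positions in a dict and removed positions
-- in a set (objective: faster, measured asymptotic speed-up).

-- ===== PORT A =====
-- one loop iteration of A: extend final_step with next_steps, then remove step if present
def aStep (acc : List String × List String) (p : String × List String) : List String × List String :=
  let reg := acc.1 ++ [p.1]
  let fin := acc.2 ++ p.2
  let fin2 := if fin.contains p.1 then (PySem.List.remove? fin p.1).getD fin else fin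
  (reg, fin2)

def get_last_step (steps : List (String × List String)) : String :=
  let r := steps.foldl aStep ([], [])
  -- final_step[0]: IndexError on an empty list is excluded by Pre_get_last_step
  PySem.List.pyGetD r.2 0 ""

-- ===== PORT B =====
-- inner loop of Source B: 'if s not in first_pos: first_pos[s] = len(stream); stream.append(s)'
-- ('s not in first_pos' is ported as get? = none: the dict's values are ints, never None)
def bInner (acc : List String × PySem.Dict String Int) (s : String) :
    List String × PySem.Dict String Int :=
  let fp := if (acc.2.get? s).isNone then acc.2.insert s ((acc.1.length : Int)) else acc.2
  (acc.1 ++ [s], fp)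

-- one loop iteration of Source B: extend stream/first_pos, then mark first_pos.get(step) removed
def bStep (acc : List String × PySem.Dict String Int × PySem.Set Int)
    (p : String × List String) : List String × PySem.Dict String Int × PySem.Set Int :=
  let sf := p.2.foldl bInner (acc.1, acc.2.1)
  let removed := match sf.2.get? p.1 with
    | some j => PySem.Set.add acc.2.2 j
    | none => acc.2.2
  (sf.1, sf.2, removed)

def get_last_step_alt (steps : List (String × List String)) : String :=
  let r := steps.foldl bStep ([], PySem.Dict.empty, PySem.Set.empty)
  -- [s for i, s in enumerate(stream) if i not in removed][0]
  PySem.List.pyGetD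
    (((PySem.List.enumerate r.1 0).filter (fun q => !(PySem.Set.contains r.2.2 q.1))).map Prod.snd)
    0 ""

-- ===== PRECONDITION & SPEC =====
-- all successors of the first i+1 items (the length of final_step just after item i is extended)
def pvStream (steps : List (String × List String)) : List String := (steps.map Prod.snd).flatten
def pvCut (steps : List (String × List String)) (i : Nat) : Nat :=
  (((steps.take (i + 1)).map Prod.snd).flatten).length
-- position j of the successor stream is deleted by A iff it is the first occurrence of its value
-- and that value is the key of some item i with j < pvCut steps i
def pvRemovedB (steps : List (String × List String)) (j : Nat) : Bool :=
  let S := pvStream steps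
  (S.idxOf? (S.getD j "") == some j) &&
  ((List.range steps.length).any
    (fun i => ((steps.getD i ("", [])).1 == S.getD j "") && decide (j < pvCut steps i)))
-- Pre_ excludes (i) association lists with duplicate keys, which a Python dict cannot contain, and
-- (ii) inputs on which every successor position is deleted, where A's final_step[0] raises IndexError.
def Pre_get_last_step (steps : List (String × List String)) : Prop :=
  (steps.map Prod.fst).Nodup ∧
  ((List.range (pvStream steps).length).any (fun j => !(pvRemovedB steps j))) = true
instance (steps : List (String × List String)) : Decidable (Pre_get_last_step steps) := by
  unfold Pre_get_last_step; infer_instance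

def pvWitness_get_last_step : (List (String × List String)) := [("a", ["b"])]

def Spec_get_last_step (steps : List (String × List String)) (out : String) : Prop :=
  out = get_last_step_alt steps
instance (steps : List (String × List String)) (out : String) :
    Decidable (Spec_get_last_step steps out) := by unfold Spec_get_last_step; infer_instance

-- ===== CLAIM (what is proved, stated in full; the proofs are below) =====
def Claim_equal_get_last_step : Prop :=
  ∀ (steps : List (String × List String)), Dom_get_last_step steps →
    Pre_get_last_step steps → Spec_get_last_step steps (get_last_step steps)

-- ===== LEMMAS AND PROOFS =====

-- the survivors of stream when its elements carry indices s, s+1, … and indices in R are deleted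
def survFrom (R : PySem.Set Int) : List String → Int → List String
  | [], _ => []
  | x :: xs, s => if s ∈ R then survFrom R xs (s + 1) else x :: survFrom R xs (s + 1)

lemma surv_eq (R : PySem.Set Int) (xs : List String) (s : Int) :
    ((PySem.List.enumerate xs s).filter (fun q => !(PySem.Set.contains R q.1))).map Prod.snd
      = survFrom R xs s := by
  induction xs generalizing s with
  | nil => simp [PySem.List.enumerate, survFrom]
  | cons x xs ih =>
      rw [PySem.List.enumerate_cons]
      by_cases h : s ∈ R <;> simp [survFrom, h] <;> simpa using ih (s + 1)

lemma survFrom_append (R : PySem.Set Int) (xs ys : List String) (s : Int) :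
    survFrom R (xs ++ ys) s = survFrom R xs s ++ survFrom R ys (s + xs.length) := by
  induction xs generalizing s with
  | nil => simp [survFrom]
  | cons x xs ih =>
      have hlen : s + ((x :: xs).length : Int) = s + 1 + (xs.length : Int) := by
        push_cast [List.length_cons]; omega
      rw [List.cons_append, hlen]
      by_cases h : s ∈ R <;> simp [survFrom, h, ih]

lemma survFrom_all_lt (R : PySem.Set Int) (xs : List String) (s : Int)
    (h : ∀ x ∈ R, x < s) : survFrom R xs s = xs := by
  induction xs generalizing s with
  | nil => rfl
  | cons x xs ih =>
      have hc : s ∉ R := fun hs => absurd (h s hs) (by omega)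
      rw [survFrom, if_neg hc, ih (s + 1) (fun x hx => by have := h x hx; omega)]

lemma survFrom_congr (R' R : PySem.Set Int) (xs : List String) (s : Int)
    (h : ∀ x : Int, s ≤ x → (x ∈ R' ↔ x ∈ R)) :
    survFrom R' xs s = survFrom R xs s := by
  induction xs generalizing s with
  | nil => rfl
  | cons x xs ih =>
      have hif : (s ∈ R') ↔ (s ∈ R) := h s le_rfl
      rw [survFrom, survFrom, ih (s + 1) (fun x hx => h x (by omega))]
      by_cases hs : s ∈ R
      · rw [if_pos (hif.mpr hs), if_pos hs]
      · rw [if_neg (fun hx => hs (hif.mp hx)), if_neg hs]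

lemma mem_survFrom (R : PySem.Set Int) (k : String) (xs : List String) (s : Int)
    (H : ∀ x ∈ R, ∀ i : Nat, ∀ hi : i < xs.length, x = s + i → xs[i] ≠ k) :
    k ∈ survFrom R xs s ↔ k ∈ xs := by
  induction xs generalizing s with
  | nil => simp [survFrom]
  | cons x xs ih =>
      have ihh : k ∈ survFrom R xs (s + 1) ↔ k ∈ xs := by
        refine ih (s + 1) (fun y hy i hi hxi => ?_)
        have := H y hy (i + 1) (by simpa using Nat.succ_lt_succ hi) (by push_cast; omega)
        simpa using this
      by_cases h : s ∈ R
      · have hxk : x ≠ k := by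
          have := H s h 0 (by simp) (by simp)
          simpa using this
        rw [survFrom, if_pos h, ihh]
        constructor
        · exact fun hk => List.mem_cons_of_mem x hk
        · intro hk
          rcases List.mem_cons.mp hk with h1 | h1
          · exact absurd h1.symm hxk
          · exact h1
      · rw [survFrom, if_neg h]
        simp [List.mem_cons, ihh]

lemma remove_survFrom (k : String) (P Q : List String) (R : PySem.Set Int) (s : Int)
    (hkP : k ∉ P)
    (H : ∀ x ∈ R, ∀ i : Nat, ∀ hi : i < (P ++ k :: Q).length, x = s + i → (P ++ k :: Q)[i] ≠ k) :
    PySem.List.remove? (survFrom R (P ++ k :: Q) s) k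
      = some (survFrom (PySem.Set.add R (s + P.length)) (P ++ k :: Q) s) := by
  induction P generalizing s with
  | nil =>
      have hs : s ∉ R := by
        intro hs
        exact (H s hs 0 (by simp) (by simp)) (by simp)
      have hs' : s ∈ PySem.Set.add R (s + ([] : List String).length) := by
        rw [PySem.Set.mem_add]; right; simp
      rw [List.nil_append, survFrom, if_neg hs, PySem.List.remove?_cons_self,
        survFrom, if_pos hs']
      have hcongr : survFrom (PySem.Set.add R (s + ([] : List String).length)) Q (s + 1)
          = survFrom R Q (s + 1) := by
        refine survFrom_congr _ _ Q (s + 1) (fun x hx => ?_)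
        rw [PySem.Set.mem_add]
        constructor
        · rintro (h1 | h1)
          · exact h1
          · simp at h1; omega
        · exact fun h1 => Or.inl h1
      rw [hcongr]
  | cons p P' ih =>
      have hkp : p ≠ k := fun hpk => hkP (by simp [hpk])
      have hkP' : k ∉ P' := fun hk => hkP (List.mem_cons_of_mem p hk)
      have Hs : ∀ x ∈ R, ∀ i : Nat, ∀ hi : i < (P' ++ k :: Q).length,
          x = (s + 1) + i → (P' ++ k :: Q)[i] ≠ k := by
        intro x hx i hi hxi
        have := H x hx (i + 1) (by simpa using Nat.succ_lt_succ hi) (by push_cast; omega)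
        simpa using this
      have hidx : (s + 1) + (P'.length : Int) = s + ((p :: P').length : Int) := by
        push_cast [List.length_cons]; omega
      have hIH := ih (s + 1) hkP' Hs
      rw [hidx] at hIH
      by_cases h : s ∈ R
      · have h' : s ∈ PySem.Set.add R (s + ((p :: P').length : Int)) := by
          rw [PySem.Set.mem_add]; exact Or.inl h
        rw [List.cons_append, survFrom, if_pos h, survFrom, if_pos h']
        exact hIH
      · have h' : s ∉ PySem.Set.add R (s + ((p :: P').length : Int)) := by
          rw [PySem.Set.mem_add]
          rintro (h1 | h1)
          · exact h h1
          · simp at h1; omega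
        rw [List.cons_append, survFrom, if_neg h, survFrom, if_neg h',
          PySem.List.remove?_cons_of_ne _ hkp, hIH]
        rfl

-- first_pos is exactly the first-occurrence index of every string in stream
def FPinv (stream : List String) (fp : PySem.Dict String Int) : Prop :=
  ∀ s : String, fp.get? s = (PySem.List.index? stream s).map (fun n => (n : Int))

-- every removed index is a valid stream position whose value is one of the processed keys
def Rinv (doneKeys : List String) (stream : List String) (R : PySem.Set Int) : Prop :=
  ∀ x ∈ R, ∃ j : Nat, x = (j : Int) ∧ ∃ hj : j < stream.length, stream[j] ∈ doneKeys

lemma bInner_fold (ns stream : List String) (fp : PySem.Dict String Int) (h : FPinv stream fp) :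
    (ns.foldl bInner (stream, fp)).1 = stream ++ ns ∧
      FPinv (stream ++ ns) (ns.foldl bInner (stream, fp)).2 := by
  induction ns generalizing stream fp with
  | nil => exact ⟨by simp, by simpa using h⟩
  | cons s0 ns ih =>
      have hfp1 : FPinv (stream ++ [s0]) (bInner (stream, fp) s0).2 := by
        intro s
        simp only [bInner]
        by_cases h0 : s0 ∈ stream
        · have : (fp.get? s0).isNone = false := by
            rw [h s0]
            cases hq : PySem.List.index? stream s0 with
            | none => exact absurd ((PySem.List.index?_eq_none_iff stream s0).mp hq) (by simpa using h0)
            | some _ => rfl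
          rw [if_neg (by simp [this]), h s]
          by_cases hm : s ∈ stream
          · rw [PySem.List.index?_append_of_mem _ hm]
          · have h1 : PySem.List.index? stream s = none :=
              (PySem.List.index?_eq_none_iff stream s).mpr hm
            have h2 : PySem.List.index? (stream ++ [s0]) s = none := by
              refine (PySem.List.index?_eq_none_iff _ s).mpr ?_
              intro hmem
              rcases List.mem_append.mp hmem with h3 | h3
              · exact hm h3
              · simp at h3; subst h3; exact hm h0
            rw [h1, h2]
        · have : (fp.get? s0).isNone = true := by
            rw [h s0, (PySem.List.index?_eq_none_iff stream s0).mpr h0]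
            rfl
          rw [if_pos (by simp [this])]
          by_cases hss : s = s0
          · subst hss
            rw [PySem.Dict.get?_insert_self, PySem.List.index?_append_singleton_self stream s h0]
            rfl
          · rw [PySem.Dict.get?_insert_of_ne _ _ hss, h s]
            by_cases hm : s ∈ stream
            · rw [PySem.List.index?_append_of_mem _ hm]
            · have h1 : PySem.List.index? stream s = none :=
                (PySem.List.index?_eq_none_iff stream s).mpr hm
              have h2 : PySem.List.index? (stream ++ [s0]) s = none := by
                refine (PySem.List.index?_eq_none_iff _ s).mpr ?_
                intro hmem
                rcases List.mem_append.mp hmem with h3 | h3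
                · exact hm h3
                · simp at h3; exact hss h3
              rw [h1, h2]
      have hfst : (bInner (stream, fp) s0).1 = stream ++ [s0] := rfl
      have := ih (stream ++ [s0]) (bInner (stream, fp) s0).2 hfp1
      constructor
      · rw [List.foldl_cons]
        have : ((stream ++ [s0]) ++ ns) = stream ++ s0 :: ns := by simp
        rw [show (bInner (stream, fp) s0) = (stream ++ [s0], (bInner (stream, fp) s0).2) from rfl] at *
        simpa [this] using (ih (stream ++ [s0]) (bInner (stream, fp) s0).2 hfp1).1
      · rw [List.foldl_cons]
        rw [show (bInner (stream, fp) s0) = (stream ++ [s0], (bInner (stream, fp) s0).2) from rfl]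
        have hap : ((stream ++ [s0]) ++ ns) = stream ++ s0 :: ns := by simp
        simpa [hap] using (ih (stream ++ [s0]) (bInner (stream, fp) s0).2 hfp1).2

lemma main_loop (rest : List (String × List String)) :
    ∀ (done : List (String × List String)) (reg fin stream : List String)
      (fp : PySem.Dict String Int) (R : PySem.Set Int),
      ((done ++ rest).map Prod.fst).Nodup →
      FPinv stream fp →
      Rinv (done.map Prod.fst) stream R →
      fin = survFrom R stream 0 →
      (rest.foldl aStep (reg, fin)).2
        = survFrom (rest.foldl bStep (stream, fp, R)).2.2 (rest.foldl bStep (stream, fp, R)).1 0 := by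
  induction rest with
  | nil =>
      intro done reg fin stream fp R hnd hfp hR hfin
      simpa using hfin
  | cons p rest ih =>
      intro done reg fin stream fp R hnd hfp hR hfin
      obtain ⟨k, ns⟩ := p
      have hfold := bInner_fold ns stream fp hfp
      have hst : (ns.foldl bInner (stream, fp)).1 = stream ++ ns := hfold.1
      have hfp' : FPinv (stream ++ ns) (ns.foldl bInner (stream, fp)).2 := hfold.2
      have hkdone : k ∉ done.map Prod.fst := by
        have h1 := hnd
        rw [List.map_append, List.nodup_append] at h1
        intro hk
        exact h1.2.2 k hk k (by simp) rfl
      have hnd' : (((done ++ [(k, ns)]) ++ rest).map Prod.fst).Nodup := by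
        rw [List.append_assoc]
        simpa using hnd
      have H_ne : ∀ x ∈ R, ∀ i : Nat, ∀ hi : i < (stream ++ ns).length,
          x = 0 + (i : Int) → (stream ++ ns)[i] ≠ k := by
        intro x hx i hi hxi
        obtain ⟨j, rfl, hj, hmem⟩ := hR x hx
        have hij : i = j := by omega
        subst hij
        rw [List.getElem_append_left hj]
        intro hkk
        exact hkdone (hkk ▸ hmem)
      have hfinExt : fin ++ ns = survFrom R (stream ++ ns) 0 := by
        rw [hfin, survFrom_append]
        congr 1
        refine (survFrom_all_lt R ns (0 + (stream.length : Int)) (fun x hx => ?_)).symm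
        obtain ⟨j, rfl, hj, _⟩ := hR x hx
        omega
      have hRext : Rinv ((done ++ [(k, ns)]).map Prod.fst) (stream ++ ns) R := by
        intro x hx
        obtain ⟨j, rfl, hj, hmem⟩ := hR x hx
        refine ⟨j, rfl, by simp; omega, ?_⟩
        rw [List.getElem_append_left hj]
        simp only [List.map_append, List.mem_append]
        exact Or.inl hmem
      simp only [List.foldl_cons]
      by_cases hc : k ∈ stream ++ ns
      · obtain ⟨j, hidx⟩ : ∃ j, PySem.List.index? (stream ++ ns) k = some j :=
          Option.isSome_iff_exists.mp ((PySem.List.index?_isSome_iff (stream ++ ns) k).mpr hc)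
        have hget : (ns.foldl bInner (stream, fp)).2.get? k = some (j : Int) := by
          rw [hfp' k, hidx]; rfl
        obtain ⟨hjlt, hjval, _⟩ := PySem.List.getElem_of_index?_eq_some hidx
        obtain ⟨P, Qt, hPQ, hPlen, hkP⟩ := (PySem.List.index?_eq_some_iff _ _ _).mp hidx
        have hmemfin : k ∈ fin ++ ns := by
          rw [hfinExt]
          exact (mem_survFrom R k (stream ++ ns) 0 H_ne).mpr hc
        have hcontains : (fin ++ ns).contains k = true := List.contains_iff_mem.mpr hmemfin
        have hrem := remove_survFrom k P Qt R 0 hkP (by rw [← hPQ]; exact H_ne)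
        rw [← hPQ] at hrem
        have hplen : (0 : Int) + (P.length : Int) = (j : Int) := by rw [hPlen]; omega
        rw [hplen] at hrem
        have haStep : (aStep (reg, fin) (k, ns)).2
            = survFrom (PySem.Set.add R (j : Int)) (stream ++ ns) 0 := by
          simp only [aStep, hcontains, if_true]
          rw [hfinExt, hrem, Option.getD_some]
        have hbStep : bStep (stream, fp, R) (k, ns)
            = (stream ++ ns, (ns.foldl bInner (stream, fp)).2, PySem.Set.add R (j : Int)) := by
          simp only [bStep, hget, hst]
        have hR' : Rinv ((done ++ [(k, ns)]).map Prod.fst) (stream ++ ns)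
            (PySem.Set.add R (j : Int)) := by
          intro x hx
          rcases (PySem.Set.mem_add R ((j : Int)) x).mp hx with h1 | h1
          · exact hRext x h1
          · subst h1
            refine ⟨j, rfl, hjlt, ?_⟩
            rw [hjval]
            simp
        have := ih (done ++ [(k, ns)]) (aStep (reg, fin) (k, ns)).1 (aStep (reg, fin) (k, ns)).2
          (stream ++ ns) (ns.foldl bInner (stream, fp)).2 (PySem.Set.add R (j : Int))
          hnd' hfp' hR' haStep
        rw [hbStep]
        simpa using this
      · have hgetn : (ns.foldl bInner (stream, fp)).2.get? k = none := by
          rw [hfp' k, (PySem.List.index?_eq_none_iff _ k).mpr hc]; rfl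
        have hncmem : k ∉ fin ++ ns := by
          rw [hfinExt]
          exact fun h => hc ((mem_survFrom R k (stream ++ ns) 0 H_ne).mp h)
        have hnc : (fin ++ ns).contains k = false :=
          Bool.eq_false_iff.mpr (fun ht => hncmem (List.contains_iff_mem.mp ht))
        have haStep : (aStep (reg, fin) (k, ns)).2 = survFrom R (stream ++ ns) 0 := by
          simp only [aStep, hnc]
          simpa using hfinExt
        have hbStep : bStep (stream, fp, R) (k, ns)
            = (stream ++ ns, (ns.foldl bInner (stream, fp)).2, R) := by
          simp only [bStep, hgetn, hst]
        have := ih (done ++ [(k, ns)]) (aStep (reg, fin) (k, ns)).1 (aStep (reg, fin) (k, ns)).2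
          (stream ++ ns) (ns.foldl bInner (stream, fp)).2 R
          hnd' hfp' hRext haStep
        rw [hbStep]
        simpa using this

-- ===== VERDICT (by name: the statement is the Claim_ definition above) =====
theorem get_last_step_spec : Claim_equal_get_last_step := by
  intro steps _hdom hpre
  simp only [Spec_get_last_step, get_last_step, get_last_step_alt]
  have h := main_loop steps [] [] [] [] PySem.Dict.empty PySem.Set.empty
    (by simpa using hpre.1)
    (by intro s; rfl)
    (by intro x hx; cases hx)
    rfl
  simp only [surv_eq]
  rw [h]
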